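-- pv_equiv track=rewrite | github.com/dorneriya/Nonogram-solver | nonogram.py | get_possible_constrains_from_row
-- ===== SOURCE A (Python) =====
-- def get_possible_constrains_from_row(row):
--     constrains = []
--     len_counter = 0
--     for val in row:
--         if val == 1 or val == -1:
--             len_counter += 1
--         if val == 0:
--             if len_counter:
--                 constrains.append(len_counter)
--                 len_counter = 0
--     if len_counter:  # add the last one who doesn't have a 0 following
--         constrains.append(len_counter)
--     return constrains
-- ===== SOURCE B (Python) =====
-- def get_possible_constrains_from_row(row):
--     # two-phase: filter out irrelevant values, booleanise, then scan maximal runs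
--     marks = [v != 0 for v in row if v in (0, 1, -1)]
--
--     def runs(ms):
--         if not ms:
--             return []
--         if not ms[0]:
--             return runs(ms[1:])
--         k = 0
--         while k < len(ms) and ms[k]:
--             k += 1
--         return [k] + runs(ms[k:])
--
--     return runs(marks)
-- ===== Notes on version B (the rewrite author's own statement) =====
-- stated objective: alternative
-- what changed: Replaces A's single pass with a running len_counter accumulator and final flush by a two-phase decomposition: first filter/booleanise the row into markers, then segment the marker list into maximal runs of True (span-recursion), needing no flush step.
import Mathlib
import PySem

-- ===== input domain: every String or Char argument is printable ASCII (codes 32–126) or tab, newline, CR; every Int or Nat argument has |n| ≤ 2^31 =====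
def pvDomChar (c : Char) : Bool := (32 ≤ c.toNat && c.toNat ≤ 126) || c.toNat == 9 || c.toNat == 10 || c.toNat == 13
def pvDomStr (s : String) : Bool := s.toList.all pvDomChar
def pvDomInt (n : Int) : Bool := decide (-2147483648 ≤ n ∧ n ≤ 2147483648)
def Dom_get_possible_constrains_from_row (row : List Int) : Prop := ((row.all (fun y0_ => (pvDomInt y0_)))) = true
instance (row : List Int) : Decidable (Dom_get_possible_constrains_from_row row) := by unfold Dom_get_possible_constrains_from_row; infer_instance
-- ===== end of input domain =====

-- B replaces A's running-counter single pass by filter/booleanise then span-recursion run segmentation (alternative decomposition).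


-- ===== PORT A =====
-- one fold over the row carrying (constrains, len_counter), then the final flush
def pvStepA (s : List Int × Int) (val : Int) : List Int × Int :=
  let lc := if val = 1 ∨ val = -1 then s.2 + 1 else s.2
  if val = 0 then (if lc ≠ 0 then (s.1 ++ [lc], 0) else (s.1, lc)) else (s.1, lc)

def get_possible_constrains_from_row (row : List Int) : List Int :=
  let r := row.foldl pvStepA ([], 0)
  if r.2 ≠ 0 then r.1 ++ [r.2] else r.1

-- ===== PORT B =====
-- marker list: keep only 0/1/-1, booleanise
def pvMarks (row : List Int) : List Bool :=
  (row.filter (fun v => decide (v = 0 ∨ v = 1 ∨ v = -1))).map (fun v => decide (v ≠ 0))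

-- span recursion over the marker list (ms[i:] slices become takeWhile/dropWhile spans)
def pvRuns : List Bool → List Int
  | [] => []
  | false :: t => pvRuns t
  | true :: t => ((1 : Int) + (t.takeWhile id).length) :: pvRuns (t.dropWhile id)
  termination_by ms => ms.length
  decreasing_by
    · simp
    · exact Nat.lt_succ_of_le (List.length_dropWhile_le id t)

def get_possible_constrains_from_row_alt (row : List Int) : List Int :=
  pvRuns (pvMarks row)

-- ===== PRECONDITION & SPEC =====
def Spec_get_possible_constrains_from_row (row : List Int) (out : List Int) : Prop := out = get_possible_constrains_from_row_alt row
instance (row : List Int) (out : List Int) : Decidable (Spec_get_possible_constrains_from_row row out) := by unfold Spec_get_possible_constrains_from_row; infer_instance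

-- ===== CLAIM (what is proved, stated in full; the proofs are below) =====
def Claim_equal_get_possible_constrains_from_row : Prop := ∀ (row : List Int), Dom_get_possible_constrains_from_row row → Spec_get_possible_constrains_from_row row (get_possible_constrains_from_row row)

-- ===== LEMMAS AND PROOFS =====

theorem pv_takeWhile_rep (m : Nat) (ms : List Bool) :
    List.takeWhile id (List.replicate m true ++ ms) = List.replicate m true ++ List.takeWhile id ms := by
  induction m with
  | zero => simp
  | succ n ih => simp [List.replicate_succ, ih]

theorem pv_dropWhile_rep (m : Nat) (ms : List Bool) :
    List.dropWhile id (List.replicate m true ++ ms) = List.dropWhile id ms := by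
  induction m with
  | zero => simp
  | succ n ih => simp [List.replicate_succ, ih]

theorem pvRuns_rep (k : Nat) :
    pvRuns (List.replicate k true) = if k = 0 then [] else [(k : Int)] := by
  cases k with
  | zero => simp [pvRuns]
  | succ n =>
    have h := pv_takeWhile_rep n ([] : List Bool)
    have h2 := pv_dropWhile_rep n ([] : List Bool)
    simp at h h2
    simp [List.replicate_succ, pvRuns]
    omega

theorem pvRuns_rep_false (k : Nat) (ms : List Bool) :
    pvRuns (List.replicate k true ++ false :: ms) =
      if k = 0 then pvRuns ms else (k : Int) :: pvRuns ms := by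
  cases k with
  | zero => simp [pvRuns]
  | succ n =>
    have h := pv_takeWhile_rep n (false :: ms)
    have h2 := pv_dropWhile_rep n (false :: ms)
    simp [List.takeWhile, List.dropWhile] at h h2
    simp [List.replicate_succ, pvRuns]
    omega

theorem pv_main (row : List Int) (cs : List Int) (k : Nat) :
    (let r := row.foldl pvStepA (cs, (k : Int));
     if r.2 ≠ 0 then r.1 ++ [r.2] else r.1)
      = cs ++ pvRuns (List.replicate k true ++ pvMarks row) := by
  induction row generalizing cs k with
  | nil =>
    simp [pvMarks, pvRuns_rep]
    split_ifs <;> simp_all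
  | cons v t ih =>
    by_cases h1 : v = 0
    · subst h1
      by_cases h2 : (k : Int) = 0
      · have hk : k = 0 := by omega
        subst hk
        simpa [pvStepA, pvMarks, pvRuns] using ih cs 0
      · have hk : k ≠ 0 := by omega
        have := ih (cs ++ [(k : Int)]) 0
        simp [pvStepA, pvMarks, pvRuns_rep_false, hk] at this ⊢
        rw [this]
    · by_cases h3 : v = 1 ∨ v = -1
      · have := ih cs (k + 1)
        have hr : List.replicate (k + 1) true ++ pvMarks t
            = List.replicate k true ++ true :: pvMarks t := by
          simp [List.replicate_succ']
        have hm : pvMarks (v :: t) = true :: pvMarks t := by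
          rcases h3 with h | h <;> subst h <;> simp [pvMarks]
        simp [pvStepA, h1, h3, hm, hr] at this ⊢
        rw [this]
      · have hcond : (decide (v = 0) || (decide (v = 1) || decide (v = -1))) = false := by
          simpa using (show ¬(v = 0 ∨ v = 1 ∨ v = -1) by tauto)
        have hm : pvMarks (v :: t) = pvMarks t := by
          simp [pvMarks, hcond]
        have := ih cs k
        simp [pvStepA, h1, h3, hm] at this ⊢
        exact this

-- ===== VERDICT (by name: the statement is the Claim_ definition above) =====
theorem get_possible_constrains_from_row_spec : Claim_equal_get_possible_constrains_from_row := by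
  intro row _
  have := pv_main row [] 0
  simpa [get_possible_constrains_from_row, get_possible_constrains_from_row_alt,
    Spec_get_possible_constrains_from_row] using this
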